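-- pv_equiv track=rewrite | github.com/zaRizk7/subnet-calculator | subnet-calculator.py | generate_netmask
-- ===== SOURCE A (Python) =====
-- from typing import List, Dict
--
-- def generate_netmask(prefix: int) -> List[int]:
--     assert 4 <= prefix <= 32, "Prefix is between 4-32!"
--     netmask_binary = [1 for i in range(prefix)]
--     netmask_binary.extend(0 for i in range(32 - prefix))
--     netmask = [
--         int("".join(str(bit) for bit in netmask_binary[i : i + 8]), 2)
--         for i in range(0, 32, 8)
--     ]
--     return netmask
-- ===== SOURCE B (Python) =====
-- def generate_netmask(prefix):
--     assert 4 <= prefix <= 32, "Prefix is between 4-32!"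
--     return [(0xFF << (8 - min(max(prefix - 8 * i, 0), 8))) & 0xFF for i in range(4)]
-- ===== Notes on version B (the rewrite author's own statement) =====
-- stated objective: simpler
-- what changed: Replaces the 32-entry bit list and per-octet binary-string parsing with a direct shift-and-mask formula for each of the 4 octets.
import Mathlib
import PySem

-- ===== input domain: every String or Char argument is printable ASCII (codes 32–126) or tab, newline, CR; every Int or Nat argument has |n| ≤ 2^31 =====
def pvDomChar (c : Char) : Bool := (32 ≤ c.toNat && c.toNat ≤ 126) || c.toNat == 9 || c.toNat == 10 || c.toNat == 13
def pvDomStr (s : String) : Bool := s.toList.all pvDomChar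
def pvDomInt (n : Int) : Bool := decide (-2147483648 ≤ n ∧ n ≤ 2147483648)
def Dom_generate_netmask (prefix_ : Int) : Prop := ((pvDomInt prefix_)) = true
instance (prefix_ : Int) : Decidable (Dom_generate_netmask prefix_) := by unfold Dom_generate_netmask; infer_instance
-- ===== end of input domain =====

-- B replaces A's 32-entry bit list and binary-string parsing by a direct shift-and-mask
-- formula per octet (objective: simpler).

-- ===== PORT A =====
-- int(s, 2) for a string of '0'/'1' digit chars: base-2 left-to-right accumulation (exact there)
def pvBinOfChars : List Char → Int → Int
  | [], acc => acc
  | c :: cs, acc => pvBinOfChars cs (2 * acc + ((c.toNat : Int) - ('0'.toNat : Int)))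

def generate_netmask (prefix_ : Int) : List Int :=
  -- netmask_binary = [1 for i in range(prefix)] extended with [0 for i in range(32 - prefix)]
  let netmask_binary :=
    (PySem.List.pyRange 0 prefix_ 1).map (fun _ => (1 : Int))
      ++ (PySem.List.pyRange 0 (32 - prefix_) 1).map (fun _ => (0 : Int))
  -- [int("".join(str(bit) for bit in netmask_binary[i:i+8]), 2) for i in range(0, 32, 8)]
  (PySem.List.pyRange 0 32 8).map (fun i =>
    pvBinOfChars
      (((PySem.List.slice netmask_binary (some i) (some (i + 8))).map
          (fun bit => (PySem.Int.toStr bit).toList)).flatten) 0)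

-- ===== PORT B =====
def generate_netmask_alt (prefix_ : Int) : List Int :=
  (PySem.List.pyRange 0 4 1).map (fun i =>
    -- (0xFF << (8 - ones)) & 0xFF; the shift amount is in [0,8], exact as Nat shift
    Int.land ((255 : Int) <<< ((8 : Int) - min (max (prefix_ - 8 * i) 0) 8).toNat) 255)

-- ===== PRECONDITION & SPEC =====
-- A's assert raises AssertionError outside 4 ≤ prefix ≤ 32
def Pre_generate_netmask (prefix_ : Int) : Prop := 4 ≤ prefix_ ∧ prefix_ ≤ 32
instance (prefix_ : Int) : Decidable (Pre_generate_netmask prefix_) := by unfold Pre_generate_netmask; infer_instance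
def pvWitness_generate_netmask : Int := (24)

def Spec_generate_netmask (prefix_ : Int) (out : List Int) : Prop := out = generate_netmask_alt prefix_
instance (prefix_ : Int) (out : List Int) : Decidable (Spec_generate_netmask prefix_ out) := by unfold Spec_generate_netmask; infer_instance

-- ===== CLAIM (what is proved, stated in full; the proofs are below) =====
def Claim_equal_generate_netmask : Prop := ∀ (prefix_ : Int), Dom_generate_netmask prefix_ → Pre_generate_netmask prefix_ → Spec_generate_netmask prefix_ (generate_netmask prefix_)

-- ===== LEMMAS AND PROOFS =====

-- ===== VERDICT (by name: the statement is the Claim_ definition above) =====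
theorem generate_netmask_spec : Claim_equal_generate_netmask := by
  intro p _ hpre
  obtain ⟨h4, h32⟩ := hpre
  unfold Spec_generate_netmask
  interval_cases p <;> decide
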